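-- pv_equiv track=rewrite | github.com/RishiPramod/SHL-Research-Intern-Assessment | recommender/engine.py | _infer_needed_test_types
-- ===== SOURCE A (Python) =====
-- from typing import Dict, Iterable, List, Optional
--
-- def _infer_needed_test_types(query: str) -> List[str]:
--     """
--     Very lightweight heuristic to infer which SHL test_type
--     categories are relevant from the query text.
--     """
--     q = query.lower()
--     needed: List[str] = []
--
--     if any(k in q for k in ["cognitive", "aptitude", "ability", "reasoning"]):
--         needed.append("Ability & Aptitude")
--
--     if any(k in q for k in ["personality", "behavior", "behaviour", "competency", "competencies"]):
--         needed.append("Personality & Behavior")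
--
--     if any(k in q for k in ["coding", "developer", "engineer", "programming", "python", "java", "sql", "technical"]):
--         needed.append("Knowledge & Skills")
--
--     # Fallback: if nothing inferred, treat as no special requirement
--     return list(dict.fromkeys(needed))  # remove duplicates while preserving order
-- ===== SOURCE B (Python) =====
-- from typing import List
--
-- _KEYWORD_TO_CATEGORY = [
--     ("cognitive", "Ability & Aptitude"),
--     ("aptitude", "Ability & Aptitude"),
--     ("ability", "Ability & Aptitude"),
--     ("reasoning", "Ability & Aptitude"),
--     ("personality", "Personality & Behavior"),
--     ("behavior", "Personality & Behavior"),
--     ("behaviour", "Personality & Behavior"),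
--     ("competency", "Personality & Behavior"),
--     ("competencies", "Personality & Behavior"),
--     ("coding", "Knowledge & Skills"),
--     ("developer", "Knowledge & Skills"),
--     ("engineer", "Knowledge & Skills"),
--     ("programming", "Knowledge & Skills"),
--     ("python", "Knowledge & Skills"),
--     ("java", "Knowledge & Skills"),
--     ("sql", "Knowledge & Skills"),
--     ("technical", "Knowledge & Skills"),
-- ]
--
-- _CANONICAL_ORDER = ["Ability & Aptitude", "Personality & Behavior", "Knowledge & Skills"]
--
-- def _infer_needed_test_types(query: str) -> List[str]:
--     q = query.lower()
--     matched = set()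
--     for kw, cat in _KEYWORD_TO_CATEGORY:
--         if kw in q:
--             matched.add(cat)
--     return [c for c in _CANONICAL_ORDER if c in matched]
-- ===== Notes on version B (the rewrite author's own statement) =====
-- stated objective: idiomatic
-- what changed: Replaced the three per-category any(...) scans plus dict.fromkeys dedup by a single pass over one keyword-to-category table maintaining a set of matched categories, emitted in the fixed canonical order.
import Mathlib
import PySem

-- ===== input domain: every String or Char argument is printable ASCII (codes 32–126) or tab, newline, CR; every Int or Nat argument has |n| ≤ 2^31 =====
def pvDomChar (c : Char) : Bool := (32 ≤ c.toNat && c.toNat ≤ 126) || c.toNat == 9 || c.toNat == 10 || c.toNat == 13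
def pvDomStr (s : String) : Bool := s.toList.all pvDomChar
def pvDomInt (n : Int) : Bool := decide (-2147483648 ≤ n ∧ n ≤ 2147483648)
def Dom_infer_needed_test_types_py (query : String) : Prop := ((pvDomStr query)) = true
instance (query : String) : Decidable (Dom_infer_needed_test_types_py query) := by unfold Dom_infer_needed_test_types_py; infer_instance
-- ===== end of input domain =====

-- B replaces A's three per-category any(...) scans + dict.fromkeys dedup by one pass over a
-- keyword→category table with a seen-set, emitted in a fixed canonical order (idiomatic rewrite).


-- ===== PORT A =====
def infer_needed_test_types_py (query : String) : List String :=
  let q := PySem.Str.lower query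
  let needed : List String := []
  let needed := if ["cognitive", "aptitude", "ability", "reasoning"].any
      (fun k => PySem.Str.isIn k q) then needed ++ ["Ability & Aptitude"] else needed
  let needed := if ["personality", "behavior", "behaviour", "competency", "competencies"].any
      (fun k => PySem.Str.isIn k q) then needed ++ ["Personality & Behavior"] else needed
  let needed := if ["coding", "developer", "engineer", "programming", "python", "java", "sql", "technical"].any
      (fun k => PySem.Str.isIn k q) then needed ++ ["Knowledge & Skills"] else needed
  PySem.List.dedup needed

-- ===== PORT B =====
def pvKeywordToCategory : List (String × String) :=
  [("cognitive", "Ability & Aptitude"), ("aptitude", "Ability & Aptitude"),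
   ("ability", "Ability & Aptitude"), ("reasoning", "Ability & Aptitude"),
   ("personality", "Personality & Behavior"), ("behavior", "Personality & Behavior"),
   ("behaviour", "Personality & Behavior"), ("competency", "Personality & Behavior"),
   ("competencies", "Personality & Behavior"),
   ("coding", "Knowledge & Skills"), ("developer", "Knowledge & Skills"),
   ("engineer", "Knowledge & Skills"), ("programming", "Knowledge & Skills"),
   ("python", "Knowledge & Skills"), ("java", "Knowledge & Skills"),
   ("sql", "Knowledge & Skills"), ("technical", "Knowledge & Skills")]

def pvCanonicalOrder : List String :=
  ["Ability & Aptitude", "Personality & Behavior", "Knowledge & Skills"]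

def infer_needed_test_types_py_alt (query : String) : List String :=
  let q := PySem.Str.lower query
  let matched := pvKeywordToCategory.foldl
    (fun (s : PySem.Set String) p => if PySem.Str.isIn p.1 q then PySem.Set.add s p.2 else s)
    PySem.Set.empty
  pvCanonicalOrder.filter (fun c => PySem.Set.contains matched c)

-- ===== PRECONDITION & SPEC =====
def Spec_infer_needed_test_types_py (query : String) (out : List String) : Prop := out = infer_needed_test_types_py_alt query
instance (query : String) (out : List String) : Decidable (Spec_infer_needed_test_types_py query out) := by unfold Spec_infer_needed_test_types_py; infer_instance

-- ===== CLAIM (what is proved, stated in full; the proofs are below) =====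
def Claim_equal_infer_needed_test_types_py : Prop := ∀ (query : String), Dom_infer_needed_test_types_py query → Spec_infer_needed_test_types_py query (infer_needed_test_types_py query)

-- ===== LEMMAS AND PROOFS =====

theorem pv_add_add_self (s : List String) (x : String) :
    PySem.Set.add (PySem.Set.add s x) x = PySem.Set.add s x := by
  simp [PySem.Set.add]
  split_ifs with h1 <;> simp_all

theorem pv_fold_group (kws : List String) (cat q : String) (s : PySem.Set String) :
    (kws.map (fun k => (k, cat))).foldl
      (fun (s : PySem.Set String) p => if PySem.Str.isIn p.1 q then PySem.Set.add s p.2 else s) s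
    = if kws.any (fun k => PySem.Str.isIn k q) then PySem.Set.add s cat else s := by
  induction kws generalizing s with
  | nil => simp
  | cons k rest ih =>
    simp only [List.map_cons, List.foldl_cons, List.any_cons]
    by_cases h : PySem.Str.isIn k q = true
    · simp only [h, Bool.true_or, if_true, ih]
      by_cases hr : rest.any (fun k => PySem.Str.isIn k q) = true
      · simp only [hr, if_true]; exact pv_add_add_self s cat
      · simp only [if_neg hr]
    · have h' : PySem.Str.isIn k q = false := by simpa using h
      simp only [h', Bool.false_or, Bool.false_eq_true, if_false, ih]


-- ===== VERDICT (by name: the statement is the Claim_ definition above) =====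
theorem infer_needed_test_types_py_spec : Claim_equal_infer_needed_test_types_py := by
  intro query _
  unfold Spec_infer_needed_test_types_py infer_needed_test_types_py infer_needed_test_types_py_alt
  dsimp only
  have hsplit : pvKeywordToCategory
      = (["cognitive", "aptitude", "ability", "reasoning"].map (fun k => (k, ("Ability & Aptitude" : String))))
        ++ (["personality", "behavior", "behaviour", "competency", "competencies"].map (fun k => (k, ("Personality & Behavior" : String))))
        ++ (["coding", "developer", "engineer", "programming", "python", "java", "sql", "technical"].map (fun k => (k, ("Knowledge & Skills" : String)))) := rfl
  rw [hsplit, List.foldl_append, List.foldl_append, pv_fold_group, pv_fold_group, pv_fold_group]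
  generalize (["cognitive", "aptitude", "ability", "reasoning"].any (fun k => PySem.Str.isIn k (PySem.Str.lower query))) = b1
  generalize (["personality", "behavior", "behaviour", "competency", "competencies"].any (fun k => PySem.Str.isIn k (PySem.Str.lower query))) = b2
  generalize (["coding", "developer", "engineer", "programming", "python", "java", "sql", "technical"].any (fun k => PySem.Str.isIn k (PySem.Str.lower query))) = b3
  cases b1 <;> cases b2 <;> cases b3 <;> decide
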